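-- pv_equiv track=rewrite | github.com/HITOfficial/College | ASD/Lekcja 9 30.04.2021/zad3.py | dfs_a_b
-- ===== SOURCE A (Python) =====
-- def dfs_b(graph,mark_up,i,j,size):
--     if i < 0 or i >= len(graph) or j < 0 or j >= len(graph) or mark_up[i][j] == True or graph[i][j] == 1: # outside indexes, land/ visided
--         return size
--     else:
--         size += 1
--         mark_up[i][j] = True
--
--     size_tmp = size
--     size_tmp = dfs_b(graph,mark_up,i-1,j,size_tmp)
--     size_tmp = dfs_b(graph,mark_up,i+1,j,size_tmp)
--     size_tmp = dfs_b(graph,mark_up,i,j-1,size_tmp)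
--     size_tmp = dfs_b(graph,mark_up,i,j+1,size_tmp)
--     return size_tmp
--
-- def dfs_a_b(graph): # graph in matrix performance
--     n = len(graph)
--     visited = [[False, 0] * n for _ in range(n)] # graph is NxN
--     max_lake = 0
--     lake = 0
--     for i in range(n):
--         for j in range(n):
--             if visited[i][j] == False and graph[i][j] == 0: # was'nt visited, and field is a water
--                 lake += 1 # it means it found start of the new lake
--                 max_lake = max(max_lake,dfs_b(graph,visited,i,j,0))
--
--     return f"max lake size: {max_lake}, lakes: {lake}"
-- ===== SOURCE B (Python) =====
-- def dfs_a_b(graph):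
--     n = len(graph)
--     seen = set()
--     max_lake = 0
--     lake = 0
--     for i in range(n):
--         for j in range(n):
--             if (i, j) not in seen and graph[i][j] == 0:
--                 lake += 1
--                 size = 0
--                 stack = [(i, j)]
--                 while stack:
--                     x, y = stack.pop()
--                     if 0 <= x < n and 0 <= y < n and (x, y) not in seen and graph[x][y] != 1:
--                         seen.add((x, y))
--                         size += 1
--                         stack.append((x, y + 1))
--                         stack.append((x, y - 1))
--                         stack.append((x + 1, y))
--                         stack.append((x - 1, y))
--                 if size > max_lake:
--                     max_lake = size
--     return f"max lake size: {max_lake}, lakes: {lake}"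
-- ===== Notes on version B (the rewrite author's own statement) =====
-- stated objective: alternative
-- what changed: Replaces A's recursive flood fill over a mutated [[False,0]*n] mark-up matrix by an iterative flood fill with an explicit stack and a set of visited (i,j) coordinates; same O(n^2) grid scan, no Python recursion (so no RecursionError on large lakes).
import Mathlib
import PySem

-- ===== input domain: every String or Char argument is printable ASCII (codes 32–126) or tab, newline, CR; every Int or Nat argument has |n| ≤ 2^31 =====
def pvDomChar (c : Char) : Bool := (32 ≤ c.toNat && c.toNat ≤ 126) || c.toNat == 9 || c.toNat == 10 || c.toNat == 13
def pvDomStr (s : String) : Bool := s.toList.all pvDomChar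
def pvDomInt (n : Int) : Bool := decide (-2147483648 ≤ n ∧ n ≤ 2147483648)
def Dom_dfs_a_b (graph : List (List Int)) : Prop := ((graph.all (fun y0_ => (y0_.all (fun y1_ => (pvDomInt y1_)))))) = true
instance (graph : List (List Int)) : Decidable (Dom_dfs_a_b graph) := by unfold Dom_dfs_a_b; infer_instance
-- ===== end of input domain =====

-- B replaces A's recursive flood fill over a mutated boolean matrix by an explicit-stack
-- iterative flood fill over a set of visited coordinates; equivalence is about the return
-- value only (A mutates no argument of dfs_a_b).

-- ===== PORT A =====
-- A-side cell primitives over A's visited matrix (rows are [False,0]*n, modelled as 2n 'false'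
-- cells: 0 == False and 0 == True behave exactly like False in the two comparisons A performs)
def vread (v : List (List Bool)) (i j : Int) : Bool := (v.getD i.toNat []).getD j.toNat false
def vmark (v : List (List Bool)) (i j : Int) : List (List Bool) := v.modify i.toNat (fun row => row.set j.toNat true)
def gread (g : List (List Int)) (i j : Int) : Int := (g.getD i.toNat []).getD j.toNat 0
-- the guard of Python's dfs_b: out of bounds, already visited (== True), or land (== 1)
def cellBlocked (g : List (List Int)) (v : List (List Bool)) (i j : Int) : Bool :=
  decide (i < 0) || decide ((g.length : Int) ≤ i) || decide (j < 0) || decide ((g.length : Int) ≤ j)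
    || vread v i j || decide (gread g i j = 1)

-- Python dfs_b, recursion made total by a structural depth bound F plus a threaded step counter c
-- (one unit per call, leftover passed on, exactly one consumed per call); with the fuel supplied by
-- dfs_a_b (4*n*n+5 ≥ 1 + 4*n*n possible calls) neither is ever exhausted.
def dfsRec (g : List (List Int)) : Nat → Nat → List (List Bool) → Int → Int → Int → (List (List Bool) × Int × Nat)
  | 0, _, v, _, _, s => (v, s, 0)
  | _+1, 0, v, _, _, s => (v, s, 0)
  | F+1, c+1, v, i, j, s =>
    if cellBlocked g v i j then (v, s, c)
    else
      let v0 := vmark v i j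
      let r1 := dfsRec g F c v0 (i-1) j (s+1)
      let r2 := dfsRec g F r1.2.2 r1.1 (i+1) j r1.2.1
      let r3 := dfsRec g F r2.2.2 r2.1 i (j-1) r2.2.1
      dfsRec g F r3.2.2 r3.1 i (j+1) r3.2.1

-- one inner-loop step of A: Python's 'visited[i][j] == False and graph[i][j] == 0' branch
def innerA (g : List (List Int)) (i : Nat) (st : List (List Bool) × Int × Int) (j : Nat) : List (List Bool) × Int × Int :=
  if !(vread st.1 (i : Int) (j : Int)) && decide (gread g (i : Int) (j : Int) = 0) then
    let r := dfsRec g (4*g.length*g.length+5) (4*g.length*g.length+5) st.1 (i : Int) (j : Int) 0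
    (r.1, max st.2.1 r.2.1, st.2.2 + 1)
  else st

def dfs_a_b (graph : List (List Int)) : String :=
  let n := graph.length
  let st := (List.range n).foldl (fun st i => (List.range n).foldl (innerA graph i) st)
      (List.replicate n ((List.replicate n [false, false]).flatten), 0, 0)
  "max lake size: " ++ PySem.Int.toStr st.2.1 ++ ", lakes: " ++ PySem.Int.toStr st.2.2

-- ===== PORT B =====
-- B's inner if: '0 <= x < n and 0 <= y < n and (x, y) not in seen and graph[x][y] != 1'
def freeCell (graph : List (List Int)) (seen : PySem.Set (Int × Int)) (x y : Int) : Bool :=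
  decide (0 ≤ x) && decide (x < (graph.length : Int)) && decide (0 ≤ y) && decide (y < (graph.length : Int))
    && !(PySem.Set.contains seen (x, y)) && !(decide ((graph.getD x.toNat []).getD y.toNat 0 = 1))

-- B's 'while stack:' loop, one fuel unit per pop (never exhausted with the fuel supplied below);
-- the list head is the top of the Python stack, i.e. the element appended last.
def floodSet (graph : List (List Int)) : Nat → PySem.Set (Int × Int) → List (Int × Int) → Int → (PySem.Set (Int × Int) × Int × Nat)
  | f, seen, [], size => (seen, size, f)
  | 0, seen, _ :: _, size => (seen, size, 0)
  | f+1, seen, (x, y) :: stack, size =>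
    if freeCell graph seen x y then
      floodSet graph f (PySem.Set.add seen (x, y)) ((x-1, y) :: (x+1, y) :: (x, y-1) :: (x, y+1) :: stack) (size+1)
    else
      floodSet graph f seen stack size

-- one inner-loop step of B: '(i, j) not in seen and graph[i][j] == 0'
def innerB (graph : List (List Int)) (i : Nat) (st : PySem.Set (Int × Int) × Int × Int) (j : Nat) : PySem.Set (Int × Int) × Int × Int :=
  if !(PySem.Set.contains st.1 ((i : Int), (j : Int))) && decide ((graph.getD i []).getD j 0 = 0) then
    let r := floodSet graph (4*graph.length*graph.length+5) st.1 [((i : Int), (j : Int))] 0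
    (r.1, if r.2.1 > st.2.1 then r.2.1 else st.2.1, st.2.2 + 1)
  else st

def dfs_a_b_alt (graph : List (List Int)) : String :=
  let n := graph.length
  let st := (List.range n).foldl (fun st i => (List.range n).foldl (innerB graph i) st)
      (PySem.Set.empty, 0, 0)
  "max lake size: " ++ PySem.Int.toStr st.2.1 ++ ", lakes: " ++ PySem.Int.toStr st.2.2

-- ===== PRECONDITION & SPEC =====
-- Pre_ excludes exactly the inputs on which Python A raises: a row shorter than len(graph) is
-- eventually indexed as graph[i][j] with j beyond its length (IndexError). Longer rows are fine.
def Pre_dfs_a_b (graph : List (List Int)) : Prop := ∀ row ∈ graph, graph.length ≤ row.length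
instance (graph : List (List Int)) : Decidable (Pre_dfs_a_b graph) := by unfold Pre_dfs_a_b; infer_instance
def pvWitness_dfs_a_b : List (List Int) := [[0, 1], [1, 0]]

def Spec_dfs_a_b (graph : List (List Int)) (out : String) : Prop := out = dfs_a_b_alt graph
instance (graph : List (List Int)) (out : String) : Decidable (Spec_dfs_a_b graph out) := by unfold Spec_dfs_a_b; infer_instance

-- ===== CLAIM (what is proved, stated in full; the proofs are below) =====
def Claim_equal_dfs_a_b : Prop := ∀ (graph : List (List Int)), Dom_dfs_a_b graph → Pre_dfs_a_b graph → Spec_dfs_a_b graph (dfs_a_b graph)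

-- ===== LEMMAS AND PROOFS =====

-- proof-side helper: A's recursion rephrased as a stack machine over A's OWN visited matrix
-- (the bridge between the two ports: dfsRec = flood on a singleton stack, floodSet simulates flood)
def flood (g : List (List Int)) : Nat → List (List Bool) → List (Int × Int) → Int → (List (List Bool) × Int × Nat)
  | f, v, [], s => (v, s, f)
  | 0, v, _ :: _, s => (v, s, 0)
  | f+1, v, (i, j) :: rest, s =>
    if cellBlocked g v i j then flood g f v rest s
    else flood g f (vmark v i j) ((i-1, j) :: (i+1, j) :: (i, j-1) :: (i, j+1) :: rest) (s+1)

-- the leftover counter of dfsRec never exceeds the counter it started with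
theorem dfsRec_counter_le (g : List (List Int)) : ∀ (F c : Nat) (v : List (List Bool)) (i j : Int) (s : Int),
    (dfsRec g F c v i j s).2.2 ≤ c := by
  intro F
  induction F with
  | zero => intro c v i j s; simp [dfsRec]
  | succ F ih =>
    intro c v i j s
    cases c with
    | zero => simp [dfsRec]
    | succ c =>
      simp only [dfsRec]
      split
      · exact Nat.le_succ c
      · exact le_trans (ih _ _ _ _ _) (le_trans (ih _ _ _ _ _)
          (le_trans (ih _ _ _ _ _) (le_trans (ih _ _ _ _ _) (Nat.le_succ c))))

-- simulation: popping (i,j) off the stack is exactly one recursive call of A's dfs_b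
theorem flood_eq_dfsRec (g : List (List Int)) : ∀ (F c : Nat), c ≤ F →
    ∀ (v : List (List Bool)) (i j s : Int) (rest : List (Int × Int)),
    flood g c v ((i, j) :: rest) s
      = flood g (dfsRec g F c v i j s).2.2 (dfsRec g F c v i j s).1 rest (dfsRec g F c v i j s).2.1 := by
  intro F
  induction F with
  | zero =>
    intro c hc v i j s rest
    interval_cases c
    cases rest <;> simp [flood, dfsRec]
  | succ F ih =>
    intro c hc v i j s rest
    cases c with
    | zero => cases rest <;> simp [flood, dfsRec]
    | succ c =>
      have hcF : c ≤ F := Nat.lt_succ_iff.mp hc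
      simp only [dfsRec, flood]
      split
      · rfl
      · rw [ih c hcF]
        rw [ih _ (le_trans (dfsRec_counter_le g F c _ _ _ _) hcF)]
        rw [ih _ (le_trans (le_trans (dfsRec_counter_le g F _ _ _ _ _) (dfsRec_counter_le g F c _ _ _ _)) hcF)]
        rw [ih _ (le_trans (le_trans (dfsRec_counter_le g F _ _ _ _ _) (le_trans (dfsRec_counter_le g F _ _ _ _ _) (dfsRec_counter_le g F c _ _ _ _))) hcF)]

theorem flood_singleton (g : List (List Int)) (f : Nat) (v : List (List Bool)) (i j s : Int) :
    flood g f v [(i, j)] s = dfsRec g f f v i j s := by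
  rw [flood_eq_dfsRec g f f le_rfl]
  simp [flood]

-- shape of A's visited matrix: n rows of 2n cells
def Shape (n : Nat) (v : List (List Bool)) : Prop := v.length = n ∧ ∀ row ∈ v, row.length = 2*n

-- abstraction relation: the visited matrix and B's seen-set agree on every in-range cell
def VRel (n : Nat) (v : List (List Bool)) (S : PySem.Set (Int × Int)) : Prop :=
  ∀ x y : Int, 0 ≤ x → x < n → 0 ≤ y → y < n → vread v x y = PySem.Set.contains S (x, y)

theorem shape_vmark (n : Nat) (v : List (List Bool)) (i j : Int) (h : Shape n v) :
    Shape n (vmark v i j) := by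
  obtain ⟨h1, h2⟩ := h
  refine ⟨by simp [vmark, h1], ?_⟩
  intro row hrow
  obtain ⟨k, hk, hget⟩ := List.mem_iff_getElem.mp hrow
  simp only [vmark] at hget hk
  rw [List.getElem_modify] at hget
  by_cases hik : i.toNat = k
  · rw [if_pos hik] at hget
    rw [← hget, List.length_set]
    exact h2 _ (List.getElem_mem _)
  · rw [if_neg hik] at hget
    rw [← hget]
    exact h2 _ (List.getElem_mem _)

theorem vread_vmark (n : Nat) (v : List (List Bool)) (i j x y : Int) (hs : Shape n v)
    (hi0 : 0 ≤ i) (hi : i < n) (hj0 : 0 ≤ j) (hj : j < n)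
    (hx0 : 0 ≤ x) (hx : x < n) (hy0 : 0 ≤ y) (hy : y < n) :
    vread (vmark v i j) x y = ((decide (x = i) && decide (y = j)) || vread v x y) := by
  simp only [vread, vmark, List.getD_eq_getElem?_getD, List.getElem?_modify]
  by_cases hxi : x = i
  · subst hxi
    cases hrow : v[x.toNat]? with
    | none =>
      exfalso
      rw [List.getElem?_eq_none_iff] at hrow
      have := hs.1
      omega
    | some row =>
      have hrowlen : row.length = 2*n := hs.2 _ (List.mem_of_getElem? hrow)
      by_cases hyj : y = j
      · subst hyj
        have hlt : y.toNat < row.length := by omega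
        simp [hlt]
      · have hne2 : j.toNat ≠ y.toNat := by omega
        simp [hne2, hyj]
  · have hne : i.toNat ≠ x.toNat := by omega
    cases hv : v[x.toNat]? <;> simp [hne, hxi]

theorem contains_add (S : PySem.Set (Int × Int)) (p q : Int × Int) :
    PySem.Set.contains (PySem.Set.add S p) q = (PySem.Set.contains S q || decide (q = p)) := by
  unfold PySem.Set.add PySem.Set.contains
  split
  · rename_i h
    by_cases hq : q = p
    · subst hq; simp; simpa using h
    · simp [hq]
  · simp

theorem vrel_mark (n : Nat) (v : List (List Bool)) (S : PySem.Set (Int × Int)) (i j : Int)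
    (hs : Shape n v) (hr : VRel n v S)
    (hi0 : 0 ≤ i) (hi : i < n) (hj0 : 0 ≤ j) (hj : j < n) :
    VRel n (vmark v i j) (PySem.Set.add S (i, j)) := by
  intro x y hx0 hx hy0 hy
  rw [vread_vmark n v i j x y hs hi0 hi hj0 hj hx0 hx hy0 hy, contains_add, hr x y hx0 hx hy0 hy]
  by_cases hxi : x = i <;> by_cases hyj : y = j <;> simp [hxi, hyj, Prod.ext_iff, Bool.or_comm]

-- the two guards agree under the abstraction relation
theorem guard_eq (g : List (List Int)) (v : List (List Bool)) (S : PySem.Set (Int × Int)) (x y : Int)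
    (hr : VRel g.length v S) :
    freeCell g S x y = !(cellBlocked g v x y) := by
  unfold freeCell cellBlocked
  by_cases h1 : 0 ≤ x
  · by_cases h2 : x < (g.length : Int)
    · by_cases h3 : 0 ≤ y
      · by_cases h4 : y < (g.length : Int)
        · have hv := hr x y h1 (by exact_mod_cast h2) h3 (by exact_mod_cast h4)
          simp [h1, h2, h3, h4, not_le.mpr h2, not_le.mpr h4, not_lt.mpr h1, not_lt.mpr h3, hv, gread]
        · simp [not_lt.mp (by simpa using h4), h4]
      · simp [not_le.mp h3, h3]
    · simp [not_lt.mp (by simpa using h2), h2]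
  · simp [not_le.mp h1, h1]

-- main simulation: floodSet over the seen-set runs in lockstep with flood over the matrix
theorem floodSet_sim (g : List (List Int)) : ∀ (f : Nat) (v : List (List Bool)) (S : PySem.Set (Int × Int))
    (stack : List (Int × Int)) (s : Int), Shape g.length v → VRel g.length v S →
    ((floodSet g f S stack s).2 = ((flood g f v stack s).2.1, (flood g f v stack s).2.2)
      ∧ Shape g.length (flood g f v stack s).1
      ∧ VRel g.length (flood g f v stack s).1 (floodSet g f S stack s).1) := by
  intro f
  induction f with
  | zero =>
    intro v S stack s hs hr
    cases stack <;> exact ⟨rfl, hs, hr⟩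
  | succ f ih =>
    intro v S stack s hs hr
    match stack with
    | [] => exact ⟨rfl, hs, hr⟩
    | (x, y) :: rest =>
      simp only [floodSet, flood, guard_eq g v S x y hr]
      by_cases hb : cellBlocked g v x y
      · simp only [hb, Bool.not_true, Bool.false_eq_true, if_false, if_pos]
        exact ih v S rest s hs hr
      · have hb' : cellBlocked g v x y = false := by simpa using hb
        have hbnds : 0 ≤ x ∧ x < (g.length : Int) ∧ 0 ≤ y ∧ y < (g.length : Int) := by
          simp only [cellBlocked, Bool.or_eq_false_iff, decide_eq_false_iff_not, not_lt, not_le] at hb'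
          exact ⟨hb'.1.1.1.1.1, hb'.1.1.1.1.2, hb'.1.1.1.2, hb'.1.1.2⟩
        simp only [hb', Bool.not_false, if_true, Bool.false_eq_true, if_false]
        exact ih (vmark v x y) (PySem.Set.add S (x, y)) _ _ (shape_vmark _ _ _ _ hs)
          (vrel_mark _ v S x y hs hr hbnds.1 (by exact_mod_cast hbnds.2.1) hbnds.2.2.1
            (by exact_mod_cast hbnds.2.2.2))

-- one inner-loop step preserves the relation and the two counters
theorem inner_step (g : List (List Int)) (i j : Nat) (hi : i < g.length) (hj : j < g.length)
    (v : List (List Bool)) (S : PySem.Set (Int × Int)) (ml lk : Int)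
    (hs : Shape g.length v) (hr : VRel g.length v S) :
    (innerB g i (S, ml, lk) j).2 = (innerA g i (v, ml, lk) j).2
      ∧ Shape g.length (innerA g i (v, ml, lk) j).1
      ∧ VRel g.length (innerA g i (v, ml, lk) j).1 (innerB g i (S, ml, lk) j).1 := by
  unfold innerA innerB
  have hv := hr (i : Int) (j : Int) (by positivity) (by exact_mod_cast hi) (by positivity) (by exact_mod_cast hj)
  have hg : gread g (i : Int) (j : Int) = (g.getD i []).getD j 0 := by
    simp [gread]
  rw [← hg, ← hv]
  by_cases hc : (!(vread v (i : Int) (j : Int)) && decide (gread g (i : Int) (j : Int) = 0)) = true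
  · simp only [hc, if_true]
    have hsim := floodSet_sim g (4*g.length*g.length+5) v S [((i : Int), (j : Int))] 0 hs hr
    rw [flood_singleton] at hsim
    refine ⟨?_, hsim.2.1, hsim.2.2⟩
    have e := congrArg Prod.fst hsim.1
    simp only [e, Prod.ext_iff]
    refine ⟨?_, by trivial⟩
    rw [max_def]
    split_ifs <;> omega
  · rw [if_neg hc, if_neg hc]
    exact ⟨rfl, hs, hr⟩

theorem inner_fold (g : List (List Int)) (i : Nat) (hi : i < g.length) :
    ∀ (js : List Nat), (∀ j ∈ js, j < g.length) →
    ∀ (v : List (List Bool)) (S : PySem.Set (Int × Int)) (ml lk : Int),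
    Shape g.length v → VRel g.length v S →
    ((js.foldl (innerB g i) (S, ml, lk)).2 = (js.foldl (innerA g i) (v, ml, lk)).2
      ∧ Shape g.length (js.foldl (innerA g i) (v, ml, lk)).1
      ∧ VRel g.length (js.foldl (innerA g i) (v, ml, lk)).1 (js.foldl (innerB g i) (S, ml, lk)).1) := by
  intro js
  induction js with
  | nil => intro _ v S ml lk hs hr; exact ⟨rfl, hs, hr⟩
  | cons j js ihj =>
    intro h v S ml lk hs hr
    simp only [List.foldl_cons]
    obtain ⟨heq, hs', hr'⟩ := inner_step g i j hi (h j (by simp)) v S ml lk hs hr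
    rw [show innerB g i (S, ml, lk) j
          = ((innerB g i (S, ml, lk) j).1, (innerA g i (v, ml, lk) j).2.1, (innerA g i (v, ml, lk) j).2.2) from by rw [← heq],
        show innerA g i (v, ml, lk) j
          = ((innerA g i (v, ml, lk) j).1, (innerA g i (v, ml, lk) j).2.1, (innerA g i (v, ml, lk) j).2.2) from rfl]
    exact ihj (fun x hx => h x (by simp [hx])) _ _ _ _ hs' hr'


theorem outer_fold (g : List (List Int)) : ∀ (is : List Nat), (∀ i ∈ is, i < g.length) →
    ∀ (v : List (List Bool)) (S : PySem.Set (Int × Int)) (ml lk : Int),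
    Shape g.length v → VRel g.length v S →
    (is.foldl (fun st i => (List.range g.length).foldl (innerB g i) st) (S, ml, lk)).2
      = (is.foldl (fun st i => (List.range g.length).foldl (innerA g i) st) (v, ml, lk)).2 := by
  intro is
  induction is with
  | nil => intro _ v S ml lk _ _; rfl
  | cons i is ihi =>
    intro h v S ml lk hs hr
    simp only [List.foldl_cons]
    obtain ⟨heq, hs', hr'⟩ := inner_fold g i (h i (by simp)) (List.range g.length)
      (fun x hx => List.mem_range.mp hx) v S ml lk hs hr
    rw [show (List.range g.length).foldl (innerB g i) (S, ml, lk)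
          = (((List.range g.length).foldl (innerB g i) (S, ml, lk)).1,
             ((List.range g.length).foldl (innerA g i) (v, ml, lk)).2.1,
             ((List.range g.length).foldl (innerA g i) (v, ml, lk)).2.2) from by rw [← heq],
        show (List.range g.length).foldl (innerA g i) (v, ml, lk)
          = (((List.range g.length).foldl (innerA g i) (v, ml, lk)).1,
             ((List.range g.length).foldl (innerA g i) (v, ml, lk)).2.1,
             ((List.range g.length).foldl (innerA g i) (v, ml, lk)).2.2) from rfl]
    exact ihi (fun x hx => h x (by simp [hx])) _ _ _ _ hs' hr'

theorem flatten_replicate_pair : ∀ (n : Nat), (List.replicate n [false, false]).flatten = List.replicate (2*n) false := by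
  intro n
  induction n with
  | zero => rfl
  | succ n ih =>
    rw [List.replicate_succ, List.flatten_cons, ih]
    have : 2 * (n + 1) = ((2*n) + 1) + 1 := by omega
    rw [this, List.replicate_succ, List.replicate_succ]
    rfl

theorem shape_init (n : Nat) : Shape n (List.replicate n ((List.replicate n [false, false]).flatten)) := by
  refine ⟨by simp, ?_⟩
  intro row hrow
  rw [List.eq_of_mem_replicate hrow, flatten_replicate_pair]
  simp

theorem vrel_init (n : Nat) : VRel n (List.replicate n ((List.replicate n [false, false]).flatten)) PySem.Set.empty := by
  intro x y _ _ _ _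
  rw [flatten_replicate_pair]
  simp [vread, PySem.Set.contains, PySem.Set.empty, List.getD_eq_getElem?_getD]
  cases h : (List.replicate n (List.replicate (2*n) false))[x.toNat]? with
  | none => rfl
  | some row => rw [List.eq_of_mem_replicate (List.mem_of_getElem? h)]; simp

-- ===== VERDICT (by name: the statement is the Claim_ definition above) =====
theorem dfs_a_b_spec : Claim_equal_dfs_a_b := by
  intro graph _ _
  unfold Spec_dfs_a_b dfs_a_b dfs_a_b_alt
  have := outer_fold graph (List.range graph.length) (fun x hx => List.mem_range.mp hx)
    (List.replicate graph.length ((List.replicate graph.length [false, false]).flatten))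
    PySem.Set.empty 0 0 (shape_init graph.length) (vrel_init graph.length)
  simp only [Prod.ext_iff] at this
  simp only [this.1, this.2]
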